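-- pv_equiv track=rewrite | github.com/limits220284/CP | leetcode/2571.将整数减少到零需要的最少操作数.py | minOperations
-- ===== SOURCE A (Python) =====
-- def minOperations(v: int) -> int:
--     arr = [int(i) for i in bin(v)[2:]]
--     arr = [0] + arr
--     n = len(arr)
--     arr.reverse()
--     l, r = 0, 0
--     ans = 0
--     while r < n:
--         if arr[r] == 0:
--             r += 1
--             l += 1
--             continue
--         while r < n and arr[r]:
--             r+=1
--         if r - l >= 2:
--             arr[r] = 1
--         ans += 1
--         l = r
--     return ans
-- ===== SOURCE B (Python) =====
-- def minOperations(v: int) -> int: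
--     ans = 0
--     while v:
--         if v % 2 == 0:
--             v //= 2
--         elif v % 4 == 1:
--             v -= 1
--             ans += 1
--         else:
--             v += 1
--             ans += 1
--     return ans
-- ===== Notes on version B (the rewrite author's own statement) =====
-- stated objective: simpler
-- what changed: A builds a reversed bit array from bin(v) and scans runs of ones with a two-pointer window, writing carry bits back into the array; B keeps no array at all and runs one arithmetic loop on the integer itself (halve when even, subtract 1 when v%4==1, add 1 when v%4==3), maintaining only the shrinking value and a counter.
import Mathlib
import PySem

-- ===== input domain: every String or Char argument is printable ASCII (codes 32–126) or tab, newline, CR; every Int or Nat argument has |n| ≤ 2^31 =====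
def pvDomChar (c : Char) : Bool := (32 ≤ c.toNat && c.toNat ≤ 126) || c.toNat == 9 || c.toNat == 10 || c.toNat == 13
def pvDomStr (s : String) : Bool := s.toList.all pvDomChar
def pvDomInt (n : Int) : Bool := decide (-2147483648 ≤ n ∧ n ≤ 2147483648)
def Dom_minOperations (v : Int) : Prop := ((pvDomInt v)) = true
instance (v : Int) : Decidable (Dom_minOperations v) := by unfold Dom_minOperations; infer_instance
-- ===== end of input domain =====

-- B replaces A's reversed bit-array + two-pointer run scan by one arithmetic loop on the integer (objective: simpler).

-- ===== PORT A =====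
-- inner `while r < n and arr[r]:` of A
def aInner (arr : List Int) (n r : Int) : Int :=
  if r < n ∧ (PySem.List.pyGet? arr r).getD 0 ≠ 0 then aInner arr n (r + 1) else r
termination_by (n - r).toNat
decreasing_by omega

-- needed only for aLoop's termination proof (cited in its decreasing_by)
theorem aInner_ge (arr : List Int) (n r : Int) : r ≤ aInner arr n r := by
  unfold aInner
  split
  · have := aInner_ge arr n (r + 1); omega
  · omega
termination_by (n - r).toNat
decreasing_by omega

-- outer `while r < n:` of A; state = (arr, l, r, ans); python's `arr[r] = 1` is in range on
-- every input admitted by Pre_ (ported as pySetD, which is exact there)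
def aLoop (arr : List Int) (n l r ans : Int) : Int :=
  if hr : r < n then
    if (PySem.List.pyGet? arr r).getD 0 = 0 then
      aLoop arr n (l + 1) (r + 1) ans
    else
      let r' := aInner arr n r
      let arr' := if r' - l ≥ 2 then PySem.List.pySetD arr r' 1 else arr
      aLoop arr' n r' r' (ans + 1)
  else ans
termination_by (n - r).toNat
decreasing_by
  · omega
  · have h1 : r + 1 ≤ aInner arr n (r + 1) := aInner_ge arr n (r + 1)
    have h2 : aInner arr n r = aInner arr n (r + 1) := by
      rw [aInner]; simp_all
    omega

-- `int(i)` on a one-char string; the .getD 0 default is never reached on Pre_ (digits are '0'/'1')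
def minOperations (v : Int) : Int :=
  let arr := (PySem.Str.slice (PySem.Int.pyBin v) (some 2) none).toList.map
      (fun c => (PySem.Int.ofStr? (String.ofList [c])).getD 0)
  let arr2 := 0 :: arr
  let n := PySem.List.len arr2
  let arr3 := arr2.reverse
  aLoop arr3 n 0 0 0

-- ===== PORT B =====
-- the while-loop of Source B; fuel is a totality guard only (the loop needs at most 2·|v| + 2 steps)
def bLoop (fuel : Nat) (v ans : Int) : Int :=
  match fuel with
  | 0 => ans
  | fuel + 1 =>
    if v = 0 then ans
    else if PySem.Int.mod v 2 = 0 then bLoop fuel (PySem.Int.floordiv v 2) ans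
    else if PySem.Int.mod v 4 = 1 then bLoop fuel (v - 1) (ans + 1)
    else bLoop fuel (v + 1) (ans + 1)

def minOperations_alt (v : Int) : Int := bLoop (4 * v.natAbs + 8) v 0

-- ===== PRECONDITION & SPEC =====
-- Pre_ excludes exactly the negative inputs, on which A raises ValueError (int('b')).
def Pre_minOperations (v : Int) : Prop := 0 ≤ v
instance (v : Int) : Decidable (Pre_minOperations v) := by unfold Pre_minOperations; infer_instance
def pvWitness_minOperations : Int := 5

def Spec_minOperations (v : Int) (out : Int) : Prop := out = minOperations_alt v
instance (v : Int) (out : Int) : Decidable (Spec_minOperations v out) := by unfold Spec_minOperations; infer_instance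

-- ===== CLAIM (what is proved, stated in full; the proofs are below) =====
def Claim_equal_minOperations : Prop := ∀ (v : Int), Dom_minOperations v → Pre_minOperations v → Spec_minOperations v (minOperations v)

-- ===== LEMMAS AND PROOFS =====

def lbits : Nat → List Int
  | m => if m = 0 then [] else ((m % 2 : Nat) : Int) :: lbits (m / 2)
termination_by m => m
decreasing_by omega

theorem lbits_odd (m : Nat) : m % 2 = 1 →
    ∃ k m', 1 ≤ k ∧ m' % 2 = 0 ∧ m = 2 ^ k * m' + (2 ^ k - 1) ∧
      lbits m = List.replicate k 1 ++ lbits m' := by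
  induction m using Nat.strong_induction_on with
  | _ m IH =>
    intro ho
    have hm0 : m ≠ 0 := by omega
    by_cases h2 : (m / 2) % 2 = 0
    · refine ⟨1, m / 2, by omega, h2, by omega, ?_⟩
      rw [lbits, if_neg hm0, ho]
      simp
    · obtain ⟨k, m', hk, hm', heq, hl⟩ := IH (m / 2) (by omega) (by omega)
      have hm2 : m = 2 ^ (k + 1) * m' + (2 ^ (k + 1) - 1) := by
        have hpow : (2:Nat) ^ (k+1) = 2 * 2 ^ k := by ring
        have hpm : 2 ^ (k+1) * m' = 2 * (2 ^ k * m') := by ring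
        have hp : 1 ≤ (2:Nat) ^ k := Nat.one_le_two_pow
        omega
      refine ⟨k + 1, m', by omega, hm', hm2, ?_⟩
      rw [lbits, if_neg hm0, ho, hl]
      simp [List.replicate_succ]

theorem aInner_run (k : Nat) : ∀ (pre t : List Int) (N : Int),
    N = ((pre ++ List.replicate k 1 ++ 0 :: t).length : Int) →
    aInner (pre ++ List.replicate k 1 ++ 0 :: t) N (pre.length : Int) = ((pre.length + k : Nat) : Int) := by
  induction k with
  | zero =>
    intro pre t N hN
    rw [aInner, if_neg ?_]
    · simp
    · simp
  | succ k IH =>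
    intro pre t N hN
    rw [aInner, if_pos ?hc]
    case hc =>
      constructor
      · rw [hN]; simp; omega
      · rw [List.replicate_succ, show pre ++ (1 :: List.replicate k 1) ++ 0 :: t = pre ++ 1 :: (List.replicate k 1 ++ 0 :: t) by simp]
        rw [PySem.List.pyGet?_append_length]
        simp
    have harr : pre ++ List.replicate (k+1) 1 ++ 0 :: t = (pre ++ [1]) ++ List.replicate k 1 ++ 0 :: t := by
      rw [List.replicate_succ]; simp
    have hidx : (pre.length : Int) + 1 = (((pre ++ [1]).length : Nat) : Int) := by simp
    rw [harr, hidx, IH (pre ++ [1]) t N (by rw [hN, harr])]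
    simp; omega

theorem set_at_len (xs : List Int) (y v : Int) (t : List Int) :
    (xs ++ y :: t).set xs.length v = xs ++ v :: t := by
  induction xs with
  | nil => rfl
  | cons a xs ih => simp [ih]

def gOps : Nat → Nat
  | m =>
    if _h0 : m = 0 then 0
    else if m % 2 = 0 then gOps (m / 2)
    else if m % 4 = 1 then 1 + gOps (m / 2)
    else 1 + gOps (m / 2 + 1)
termination_by m => m
decreasing_by all_goals omega

theorem gOps_zero : gOps 0 = 0 := by
  rw [gOps]
  simp

theorem gOps_one : gOps 1 = 1 := by
  rw [gOps]
  norm_num [gOps_zero]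

theorem gOps_pow_mul (j : Nat) : ∀ (a : Nat), 0 < a → gOps (2 ^ j * a) = gOps a := by
  induction j with
  | zero => intro a _; simp
  | succ j IH =>
    intro a ha
    have hsp : 2 ^ (j + 1) * a = 2 * (2 ^ j * a) := by ring
    rw [gOps]
    rw [dif_neg (by positivity)]
    rw [if_pos (by omega)]
    rw [hsp, Nat.mul_div_cancel_left _ (by norm_num)]
    exact IH a ha

theorem gOps_two_pow (j : Nat) : gOps (2 ^ j) = 1 := by
  have := gOps_pow_mul j 1 (by omega)
  simpa [gOps_one] using this

theorem aLoop_one_end (pre : List Int) (ans : Int) :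
    aLoop (pre ++ [1]) ((pre.length : Int) + 1) (pre.length : Int) (pre.length : Int) ans = ans + 1 := by
  rw [aLoop, dif_pos (by omega)]
  rw [if_neg (by rw [PySem.List.pyGet?_append_length]; simp)]
  have hinner : aInner (pre ++ [1]) ((pre.length : Int) + 1) (pre.length : Int) = (pre.length : Int) + 1 := by
    rw [aInner, if_pos ⟨by omega, by rw [PySem.List.pyGet?_append_length]; simp⟩]
    rw [aInner, if_neg (by omega)]
  simp only [hinner]
  rw [if_neg (by omega)]
  rw [aLoop, dif_neg (by omega)]

theorem aLoop_main (m : Nat) : ∀ (pre : List Int) (ans : Int) (N : Int),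
    N = ((pre ++ lbits m ++ [0]).length : Int) →
    aLoop (pre ++ lbits m ++ [0]) N (pre.length : Int) (pre.length : Int) ans
      = ans + (gOps m : Int) := by
  induction m using Nat.strong_induction_on with
  | _ m IH =>
    intro pre ans N hN
    have hNval : N = (pre.length : Int) + (lbits m).length + 1 := by
      rw [hN]; simp [List.length_append]; ring
    by_cases h0 : m = 0
    · subst h0
      have hl : lbits 0 = [] := by rw [lbits]; simp
      rw [hl] at hN hNval ⊢
      rw [aLoop, dif_pos (by simp at hNval; omega)]
      rw [if_pos (by
        rw [show pre ++ [] ++ [0] = pre ++ (0 : Int) :: [] by simp]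
        rw [PySem.List.pyGet?_append_length]; simp)]
      rw [aLoop, dif_neg (by simp at hNval; omega)]
      simp [gOps_zero]
    · by_cases he : m % 2 = 0
      · -- even: one zero step, recurse at m/2
        have hl : lbits m = 0 :: lbits (m / 2) := by
          rw [lbits, if_neg h0, he]; simp
        have hlt : (pre.length : Int) < N := by rw [hNval]; omega
        rw [aLoop, dif_pos hlt]
        rw [if_pos (by
          rw [show pre ++ lbits m ++ [0] = pre ++ (0 : Int) :: (lbits (m / 2) ++ [0]) by rw [hl]; simp]
          rw [PySem.List.pyGet?_append_length]; simp)]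
        have harr : pre ++ lbits m ++ [0] = (pre ++ [0]) ++ lbits (m / 2) ++ [0] := by
          rw [hl]; simp
        have hidx : (pre.length : Int) + 1 = (((pre ++ [(0:Int)]).length : Nat) : Int) := by simp
        rw [harr, hidx, IH (m / 2) (by omega) (pre ++ [0]) ans N (by rw [hN, harr])]
        have e : gOps m = gOps (m / 2) := by
          conv_lhs => rw [gOps]
          rw [dif_neg h0, if_pos he]
        rw [e]
      · -- odd
        obtain ⟨k, m', hk1, hm'e, hmeq, hl⟩ := lbits_odd m (by omega)
        obtain ⟨kk, rfl⟩ : ∃ kk, k = kk + 1 := ⟨k - 1, by omega⟩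
        obtain ⟨t, ht⟩ : ∃ t, lbits m' ++ [0] = (0 : Int) :: t := by
          by_cases hm0 : m' = 0
          · exact ⟨[], by subst hm0; rw [lbits]; simp⟩
          · refine ⟨lbits (m' / 2) ++ [0], ?_⟩
            rw [lbits, if_neg hm0, hm'e]; simp
        have harr : pre ++ lbits m ++ [0] = pre ++ List.replicate (kk + 1) 1 ++ (0 : Int) :: t := by
          rw [hl]; simp [ht]
        have hlt : (pre.length : Int) < N := by rw [hNval]; omega
        rw [aLoop, dif_pos hlt]
        rw [if_neg (by
          rw [show pre ++ lbits m ++ [0] = pre ++ (1 : Int) :: (List.replicate kk 1 ++ (0:Int) :: t) by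
            rw [harr, List.replicate_succ]; simp]
          rw [PySem.List.pyGet?_append_length]; simp)]
        have hr' : aInner (pre ++ lbits m ++ [0]) N (pre.length : Int)
            = ((pre.length + (kk + 1) : Nat) : Int) := by
          rw [harr]
          exact aInner_run (kk + 1) pre t N (by rw [hN, harr])
        simp only [hr']
        by_cases hkk : kk = 0
        · -- run of length 1: no carry write
          subst hkk
          rw [if_neg (by push_cast; omega)]
          have harr2 : pre ++ lbits m ++ [0] = (pre ++ [1]) ++ lbits m' ++ [0] := by
            rw [hl]; simp
          have hidx : ((pre.length + (0 + 1) : Nat) : Int) = (((pre ++ [(1:Int)]).length : Nat) : Int) := by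
            simp
          have hm2 : m = 2 * m' + 1 := by
            have : (2:Nat) ^ (0 + 1) = 2 := by norm_num
            omega
          rw [harr2, hidx, IH m' (by omega) (pre ++ [1]) (ans + 1) N (by rw [hN, harr2])]
          have e : gOps m = 1 + gOps m' := by
            conv_lhs => rw [gOps]
            rw [dif_neg h0, if_neg he, if_pos (by omega)]
            rw [show m / 2 = m' by omega]
          rw [e]; push_cast; ring
        · -- run of length kk+1 ≥ 2: carry write
          obtain ⟨j, rfl⟩ : ∃ j, kk = j + 1 := ⟨kk - 1, by omega⟩
          have ee : (2:Nat) ^ (j + 1 + 1) = 4 * 2 ^ j := by ring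
          have ee2 : (2:Nat) ^ (j + 1 + 1) * m' = 4 * (2 ^ j * m') := by ring
          have ee3 : (2:Nat) ^ (j + 1) * (m' + 1) = 2 * (2 ^ j * m') + 2 * 2 ^ j := by ring
          have hp : 1 ≤ (2:Nat) ^ j := Nat.one_le_two_pow
          have hmm : m' ≤ 2 ^ j * m' := Nat.le_mul_of_pos_left m' (by omega)
          rw [if_pos (by push_cast; omega)]
          have hset : PySem.List.pySetD (pre ++ lbits m ++ [0]) ((pre.length + (j + 1 + 1) : Nat) : Int) 1
              = (pre ++ List.replicate (j + 1 + 1) 1) ++ (1 : Int) :: t := by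
            rw [harr, PySem.List.pySetD_natCast]
            rw [show pre ++ List.replicate (j + 1 + 1) 1 ++ (0:Int) :: t
                = (pre ++ List.replicate (j + 1 + 1) 1) ++ (0:Int) :: t by simp]
            rw [show pre.length + (j + 1 + 1) = (pre ++ List.replicate (j + 1 + 1) (1:Int)).length by simp]
            rw [set_at_len]
          rw [hset]
          have hidx : ((pre.length + (j + 1 + 1) : Nat) : Int)
              = (((pre ++ List.replicate (j + 1 + 1) (1:Int)).length : Nat) : Int) := by simp
          have hg : gOps m = 1 + gOps ((2:Nat) ^ (j + 1) * (m' + 1)) := by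
            conv_lhs => rw [gOps]
            rw [dif_neg h0, if_neg he, if_neg (by omega)]
            rw [show m / 2 + 1 = 2 ^ (j + 1) * (m' + 1) by omega]
          by_cases hm0 : m' = 0
          · subst hm0
            have ht0 : t = [] := by
              rw [lbits] at ht; simp at ht; exact ht
            subst ht0
            have hN2 : N = (((pre ++ List.replicate (j + 1 + 1) (1:Int)).length : Nat) : Int) + 1 := by
              rw [hNval, hl, show lbits 0 = [] from by rw [lbits]; simp]
              push_cast [List.length_append, List.length_replicate, List.length_nil]
              ring
            rw [hidx, hN2, aLoop_one_end (pre ++ List.replicate (j + 1 + 1) 1) (ans + 1)]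
            rw [hg]
            rw [show (2:Nat) ^ (j + 1) * (0 + 1) = 2 ^ (j + 1) by ring, gOps_two_pow]
            push_cast; ring
          · have hlm' : lbits m' = (0 : Int) :: lbits (m' / 2) := by
              rw [lbits, if_neg hm0, hm'e]; simp
            have ht' : t = lbits (m' / 2) ++ [0] := by
              rw [hlm'] at ht; simpa using ht.symm
            have hlm1 : lbits (m' + 1) = (1 : Int) :: lbits (m' / 2) := by
              rw [lbits, if_neg (by omega)]
              rw [show (m' + 1) % 2 = 1 by omega, show (m' + 1) / 2 = m' / 2 by omega]
              simp
            have harr3 : (pre ++ List.replicate (j + 1 + 1) 1) ++ (1 : Int) :: t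
                = (pre ++ List.replicate (j + 1 + 1) 1) ++ lbits (m' + 1) ++ [0] := by
              rw [ht', hlm1]; simp
            have hmlt : m' + 1 < m := by omega
            rw [harr3, hidx, IH (m' + 1) hmlt (pre ++ List.replicate (j + 1 + 1) 1) (ans + 1) N ?hlen]
            case hlen =>
              rw [hN, harr]
              push_cast [List.length_append, List.length_replicate, List.length_cons, ht', hlm1]
              ring
            rw [hg, gOps_pow_mul (j + 1) (m' + 1) (by omega)]
            push_cast; ring

def cbits : Nat → List Char
  | m => if m / 2 = 0 then [Nat.digitChar (m % 2)] else Nat.digitChar (m % 2) :: cbits (m / 2)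
termination_by m => m
decreasing_by omega

def dig (c : Char) : Int := (PySem.Int.ofStr? (String.ofList [c])).getD 0

theorem toDigitsCore_eq (m : Nat) : ∀ (fuel : Nat) (acc : List Char), m < fuel →
    Nat.toDigitsCore 2 fuel m acc = (cbits m).reverse ++ acc := by
  induction m using Nat.strong_induction_on with
  | _ m IH =>
    intro fuel acc hf
    obtain ⟨f, rfl⟩ : ∃ f, fuel = f + 1 := ⟨fuel - 1, by omega⟩
    rw [Nat.toDigitsCore]
    by_cases h : m / 2 = 0
    · simp only [h, if_pos]
      conv_rhs => rw [cbits]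
      simp [h]
    · simp only [h, if_false]
      rw [IH (m / 2) (by omega) f _ (by omega)]
      conv_rhs => rw [cbits]
      simp [h]

theorem toDigits_eq (m : Nat) : Nat.toDigits 2 m = (cbits m).reverse := by
  rw [Nat.toDigits, toDigitsCore_eq m (m+1) [] (by omega)]; simp

theorem map_dig_cbits (m : Nat) : (cbits m).map dig = if m = 0 then [0] else lbits m := by
  induction m using Nat.strong_induction_on with
  | _ m IH =>
    rw [cbits]
    by_cases h : m / 2 = 0
    · rw [if_pos h]
      by_cases h0 : m = 0
      · subst h0; simp; decide
      · have h1 : m = 1 := by omega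
        subst h1
        rw [if_neg (by omega), lbits]
        simp [lbits]; decide
    · rw [if_neg h, if_neg (by omega)]
      simp only [List.map_cons]
      rw [IH (m / 2) (by omega), if_neg h]
      conv_rhs => rw [lbits]
      rw [if_neg (by omega)]
      have : dig (Nat.digitChar (m % 2)) = ((m % 2 : Nat) : Int) := by
        have : m % 2 = 0 ∨ m % 2 = 1 := by omega
        rcases this with h2 | h2 <;> rw [h2] <;> decide
      rw [this]

theorem modc2 (m : Nat) : PySem.Int.mod (m : Int) 2 = ((m % 2 : Nat) : Int) := by
  simp

theorem modc4 (m : Nat) : PySem.Int.mod (m : Int) 4 = ((m % 4 : Nat) : Int) := by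
  simp

theorem divc2 (m : Nat) : PySem.Int.floordiv (m : Int) 2 = ((m / 2 : Nat) : Int) := by
  simp

theorem bLoop_eq (m : Nat) : ∀ (fuel : Nat) (ans : Int), 2 * m + 2 ≤ fuel →
    bLoop fuel (m : Int) ans = ans + (gOps m : Int) := by
  induction m using Nat.strong_induction_on with
  | _ m IH =>
    intro fuel ans hf
    obtain ⟨f, rfl⟩ : ∃ f, fuel = f + 1 := ⟨fuel - 1, by omega⟩
    rw [bLoop]
    by_cases h0 : m = 0
    · subst h0; simp [gOps]
    · rw [if_neg (by exact_mod_cast h0)]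
      by_cases he : m % 2 = 0
      · rw [if_pos (by rw [modc2]; exact_mod_cast he)]
        rw [divc2, IH (m / 2) (by omega) f ans (by omega)]
        have e : gOps m = gOps (m / 2) := by
          conv_lhs => rw [gOps]
          rw [dif_neg h0, if_pos he]
        rw [e]
      · rw [if_neg (by rw [modc2]; exact_mod_cast he)]
        by_cases h1 : m % 4 = 1
        · rw [if_pos (by rw [modc4]; exact_mod_cast h1)]
          have hc : (m : Int) - 1 = ((m - 1 : Nat) : Int) := by omega
          rw [hc, IH (m - 1) (by omega) f (ans + 1) (by omega)]
          have e1 : gOps m = 1 + gOps (m / 2) := by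
            conv_lhs => rw [gOps]
            rw [dif_neg h0, if_neg he, if_pos h1]
          have e2 : gOps (m - 1) = gOps (m / 2) := by
            by_cases hm1 : m = 1
            · subst hm1; rfl
            · conv_lhs => rw [gOps]
              rw [dif_neg (by omega), if_pos (by omega)]
              have : (m - 1) / 2 = m / 2 := by omega
              rw [this]
          rw [e2, e1]; push_cast; ring
        · rw [if_neg (by rw [modc4]; exact_mod_cast h1)]
          have h3 : m % 4 = 3 := by omega
          have hc : (m : Int) + 1 = ((m + 1 : Nat) : Int) := by omega
          rw [hc]
          obtain ⟨f', rfl⟩ : ∃ f', f = f' + 1 := ⟨f - 1, by omega⟩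
          rw [bLoop]
          rw [if_neg (by exact_mod_cast (by omega : ¬ (m + 1 = 0)))]
          rw [if_pos (by rw [modc2]; exact_mod_cast (by omega : (m+1) % 2 = 0))]
          rw [divc2]
          have hh : (m + 1) / 2 = m / 2 + 1 := by omega
          rw [hh, IH (m / 2 + 1) (by omega) f' (ans + 1) (by omega)]
          have e1 : gOps m = 1 + gOps (m / 2 + 1) := by
            conv_lhs => rw [gOps]
            rw [dif_neg h0, if_neg he, if_neg h1]
          rw [e1]; push_cast; ring


theorem minOperations_eq_gOps (m : Nat) : minOperations (m : Int) = (gOps m : Int) := by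
  have harr : ((PySem.Str.slice (PySem.Int.pyBin (m : Int)) (some 2) none).toList).map
      (fun c => (PySem.Int.ofStr? (String.ofList [c])).getD 0) = (Nat.toDigits 2 m).map dig := by
    show ((PySem.Str.slice (PySem.Int.pyBin (m : Int)) (some 2) none).toList).map dig
        = (Nat.toDigits 2 m).map dig
    rw [PySem.Str.toList_slice, PySem.Chars.slice_eq_listSlice, PySem.Int.toList_pyBin]
    rw [show (2 : Int) = ((2 : Nat) : Int) from by norm_num]
    rw [PySem.List.slice_from_natCast]
    unfold PySem.Int.toBinChars0b
    rw [if_neg (by omega)]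
    simp
  have hrev : ((0 : Int) :: (Nat.toDigits 2 m).map dig).reverse = ((cbits m).map dig) ++ [0] := by
    rw [toDigits_eq]
    simp
  have hlen : PySem.List.len ((0 : Int) :: (Nat.toDigits 2 m).map dig)
      = ((((cbits m).map dig).length + 1 : Nat) : Int) := by
    rw [PySem.List.len_eq, toDigits_eq]
    simp
  unfold minOperations
  simp only [harr, hrev, hlen, map_dig_cbits]
  by_cases h0 : m = 0
  · subst h0
    norm_num
    rw [aLoop, dif_pos (by norm_num), if_pos (by decide)]
    rw [aLoop, dif_pos (by norm_num), if_pos (by decide)]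
    rw [aLoop, dif_neg (by norm_num)]
    simp [gOps_zero]
  · rw [if_neg h0]
    have := aLoop_main m [] 0 (((lbits m).length + 1 : Nat) : Int) (by simp)
    simpa using this

theorem alt_eq_gOps (m : Nat) : minOperations_alt (m : Int) = (gOps m : Int) := by
  unfold minOperations_alt
  rw [show ((m : Int).natAbs) = m by simp]
  rw [bLoop_eq m (4 * m + 8) 0 (by omega)]
  simp

-- ===== VERDICT (by name: the statement is the Claim_ definition above) =====
theorem minOperations_spec : Claim_equal_minOperations := by
  intro v _ hpre
  unfold Pre_minOperations at hpre
  unfold Spec_minOperations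
  obtain ⟨m, rfl⟩ : ∃ m : Nat, v = (m : Int) := ⟨v.toNat, by omega⟩
  rw [minOperations_eq_gOps, alt_eq_gOps]
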